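-- pv_equiv track=rewrite | github.com/woowacourse-study/2022-lv3-algorithm-study | 5주차/5107/5107_python_이프.py | solution
-- ===== SOURCE A (Python) =====
-- def solution(links):
--     nodes = list(links.keys())
--     result = 0
--
--     while nodes:
--         prev = nodes[0]
--
--         visited = {prev}
--         while len(visited) <= len(nodes):
--             node = links[prev]
--             if node in visited:
--                 result += 1
--                 break
--             if node not in nodes:
--                 break
--             visited.add(node)
--             prev = node
--
--         nodes = list(set(nodes) - visited)
--     return result
-- ===== SOURCE B (Python) =====
-- def solution(links):
--     # One pass over the keys with a coloring dict: each walk stamps its trail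
--     # with a fresh run id; a walk that re-enters its own run id found a new cycle.
--     color = {}
--     count = 0
--     run = 0
--     for start in links:
--         if start in color:
--             continue
--         run += 1
--         node = start
--         while node in links and node not in color:
--             color[node] = run
--             node = links[node]
--         if node in color and color[node] == run:
--             count += 1
--     return count
-- ===== Notes on version B (the rewrite author's own statement) =====
-- stated objective: faster
-- what changed: A repeatedly restarts from the first remaining key and rebuilds the remaining-node list by set difference after every trail (quadratic passes); B makes a single pass over the keys with a coloring dict that stamps each trail with a fresh run id, counting a cycle exactly when a walk re-enters its own run id.
import Mathlib
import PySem

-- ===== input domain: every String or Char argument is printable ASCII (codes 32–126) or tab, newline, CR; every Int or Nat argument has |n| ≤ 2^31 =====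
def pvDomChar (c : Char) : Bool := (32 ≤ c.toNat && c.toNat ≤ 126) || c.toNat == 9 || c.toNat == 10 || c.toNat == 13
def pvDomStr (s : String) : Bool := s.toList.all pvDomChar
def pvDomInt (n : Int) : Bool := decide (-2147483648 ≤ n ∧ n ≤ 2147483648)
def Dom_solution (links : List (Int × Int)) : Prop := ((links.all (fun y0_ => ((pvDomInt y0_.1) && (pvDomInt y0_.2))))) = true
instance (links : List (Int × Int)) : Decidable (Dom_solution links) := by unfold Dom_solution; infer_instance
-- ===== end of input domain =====

-- B replaces A's repeated restart-and-set-difference passes by one pass over the keys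
-- with a coloring dict stamping each trail with a fresh run id; same return value.
-- (Python A iterates over a hash set when rebuilding `nodes`; the count A returns does
-- not depend on that order, and the port uses PySem.Set's insertion order.)

-- ===== PORT A =====
-- inner 'while len(visited) <= len(nodes)' loop; returns (increment to result, visited).
-- `fuel` is a totality guard: each pass grows `visited` by one element of `nodes`, so with
-- fuel = nodes.length + 1 the `0` case is never reached while the `while` condition holds
-- (and its value coincides with the loop-exit value). The `none` branch of `links.get? prev`
-- is a totality guard only: `prev` is always a key.
def solInner (links : PySem.Dict Int Int) (nodes : List Int) :
    Nat → Int → PySem.Set Int → Int × PySem.Set Int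
  | 0, _, visited => (0, visited)
  | fuel + 1, prev, visited =>
    if visited.length ≤ nodes.length then
      match links.get? prev with
      | none => (0, visited)
      | some node =>
        if PySem.Set.contains visited node then (1, visited)
        else if node ∈ nodes then
          solInner links nodes fuel node (PySem.Set.add visited node)
        else (0, visited)
    else (0, visited)

-- 'while nodes:' loop carrying result. `fuel` is a totality guard: every pass removes at
-- least `prev` from `nodes`, so with fuel = nodes.length the `0` case is only reached with
-- `nodes = []`, where its value coincides with the loop exit.
def solLoop (links : PySem.Dict Int Int) : Nat → List Int → Int → Int
  | 0, _, result => result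
  | fuel + 1, nodes, result =>
    match nodes with
    | [] => result
    | prev :: _ =>
      let r := solInner links nodes (nodes.length + 1) prev (PySem.Set.ofList [prev])
      solLoop links fuel (PySem.Set.diff (PySem.Set.ofList nodes) r.2) (result + r.1)

def solution (links : List (Int × Int)) : Int :=
  let d := PySem.Dict.ofList links
  solLoop d d.keys.length d.keys 0

-- ===== PORT B =====
-- 'while node in links and node not in color:' walk; returns (color, final node).
-- `fuel` is a totality guard: each pass colors a previously uncolored key, so with
-- fuel = links.size + 1 the `0` case is never reached while the condition holds (and
-- its value coincides with the loop-exit value). The `none` branch of `links.get? node`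
-- is a totality guard only: the walk just tested `links.contains node`.
def altWalk (links : PySem.Dict Int Int) (run : Int) :
    Nat → PySem.Dict Int Int → Int → PySem.Dict Int Int × Int
  | 0, color, node => (color, node)
  | fuel + 1, color, node =>
    if links.contains node ∧ ¬ color.contains node then
      match links.get? node with
      | none => (color, node)
      | some nxt => altWalk links run fuel (color.insert node run) nxt
    else (color, node)

-- body of the 'for start in links:' loop over state (color, count, run)
def altStep (links : PySem.Dict Int Int) (st : PySem.Dict Int Int × Int × Int)
    (start : Int) : PySem.Dict Int Int × Int × Int :=
  if st.1.contains start then st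
  else
    let run := st.2.2 + 1
    let w := altWalk links run (links.size + 1) st.1 start
    if w.1.contains w.2 ∧ w.1.getD w.2 0 = run then (w.1, st.2.1 + 1, run)
    else (w.1, st.2.1, run)

def solution_alt (links : List (Int × Int)) : Int :=
  let d := PySem.Dict.ofList links
  (d.keys.foldl (altStep d) (PySem.Dict.empty, 0, 0)).2.1

-- ===== PRECONDITION & SPEC =====
def Spec_solution (links : List (Int × Int)) (out : Int) : Prop := out = solution_alt links
instance (links : List (Int × Int)) (out : Int) : Decidable (Spec_solution links out) := by unfold Spec_solution; infer_instance

-- ===== CLAIM (what is proved, stated in full; the proofs are below) =====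
def Claim_equal_solution : Prop := ∀ (links : List (Int × Int)), Dom_solution links → Spec_solution links (solution links)

-- ===== LEMMAS AND PROOFS =====

-- B's walk strictly shrinks the set of uncolored keys at every step
theorem filter_insert_lt (links color : PySem.Dict Int Int) (node run : Int)
    (h1 : links.contains node = true) (h2 : ¬ color.contains node = true) :
    (links.keys.filter (fun k => !(color.insert node run).contains k)).length
      < (links.keys.filter (fun k => !color.contains k)).length := by
  have hnode : node ∈ links.keys := (PySem.Dict.contains_iff_mem_keys links node).1 h1
  have heq : links.keys.filter (fun k => !(color.insert node run).contains k)
      = (links.keys.filter (fun k => !color.contains k)).filter (fun k => !(k == node)) := by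
    rw [List.filter_filter]
    apply List.filter_congr
    intro k _
    simp only [PySem.Dict.contains_insert, Bool.not_or]
  rw [heq]
  apply List.length_filter_lt_length_iff_exists.2
  exact ⟨node, by simp [List.mem_filter, hnode, h2], by simp⟩

-- B's walk stops as soon as its loop condition fails, whatever fuel is left
theorem altWalk_stop (links : PySem.Dict Int Int) (run : Int) (nB : Nat)
    (color : PySem.Dict Int Int) (node : Int)
    (h : ¬ (links.contains node = true ∧ ¬ color.contains node = true)) :
    altWalk links run nB color node = (color, node) := by
  cases nB with
  | zero => rfl
  | succ m => rw [altWalk, if_neg h]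

-- lock-step simulation of A's inner trail walk and B's coloring walk
-- (nA bounds A's while-condition measure, nB bounds B's uncolored-key count)
theorem inner_sim (d : PySem.Dict Int Int) (nodes : List Int)
    (hnodessub : ∀ x ∈ nodes, d.contains x = true) :
    ∀ (nA nB : Nat) (prev : Int) (vis : PySem.Set Int) (color0 colorCur : PySem.Dict Int Int)
      (run' cur : Int),
      nodes.length + 1 - vis.length ≤ nA →
      (d.keys.filter (fun k => !colorCur.contains k)).length < nB →
      vis.Nodup → vis ⊆ nodes → prev ∈ vis →
      (∀ k, colorCur.contains k = (color0.contains k || decide (k ∈ vis))) →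
      (∀ k ∈ vis, colorCur.get? k = some run') →
      (∀ k, k ∉ vis → colorCur.get? k = color0.get? k) →
      (∀ k, color0.contains k = true → d.contains k = true) →
      (∀ k v, color0.get? k = some v → v ≠ run') →
      (∀ k, d.contains k = true → k ∉ nodes → color0.contains k = true) →
      (∀ k ∈ nodes, color0.contains k = false) →
      d.get? prev = some cur →
      (∀ k, (altWalk d run' nB colorCur cur).1.contains k
          = (color0.contains k || decide (k ∈ (solInner d nodes nA prev vis).2))) ∧
      (∀ k ∈ (solInner d nodes nA prev vis).2,
          (altWalk d run' nB colorCur cur).1.get? k = some run') ∧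
      (∀ k, k ∉ (solInner d nodes nA prev vis).2 →
          (altWalk d run' nB colorCur cur).1.get? k = color0.get? k) ∧
      (solInner d nodes nA prev vis).2 ⊆ nodes ∧
      vis ⊆ (solInner d nodes nA prev vis).2 ∧
      (solInner d nodes nA prev vis).2.Nodup ∧
      (solInner d nodes nA prev vis).1
        = (if (altWalk d run' nB colorCur cur).1.contains (altWalk d run' nB colorCur cur).2
              ∧ (altWalk d run' nB colorCur cur).1.getD (altWalk d run' nB colorCur cur).2 0 = run'
           then 1 else 0) := by
  intro nA
  induction nA with
  | zero =>
    intro nB prev vis color0 colorCur run' cur hfuel _ hvnd hvsub _ _ _ _ _ _ _ _ _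
    exact absurd (List.Subperm.length_le (List.subperm_of_subset hvnd hvsub)) (by omega)
  | succ n ih =>
    intro nB prev vis color0 colorCur run' cur hfuel hBf hvnd hvsub hprev hc1 hc2 hc3 h0sub
      h0fresh hcover hnodes0 hget
    have hle : vis.length ≤ nodes.length :=
      List.Subperm.length_le (List.subperm_of_subset hvnd hvsub)
    rw [solInner, if_pos hle]
    simp only [hget]
    by_cases hcv : cur ∈ vis
    · -- A: node in visited, a new cycle; B: the walk re-entered its own run
      have hcvb : PySem.Set.contains vis cur = true := (PySem.Set.contains_iff vis cur).2 hcv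
      have hccur : colorCur.contains cur = true := by
        rw [PySem.Dict.contains_eq_isSome_get?, hc2 cur hcv]; rfl
      rw [if_pos hcvb, altWalk_stop d run' nB colorCur cur (by simp [hccur])]
      refine ⟨hc1, hc2, hc3, hvsub, fun a ha => ha, hvnd, ?_⟩
      rw [if_pos ⟨hccur, by rw [PySem.Dict.getD_eq_get?_getD, hc2 cur hcv]; rfl⟩]
    · have hcvb : ¬ PySem.Set.contains vis cur = true := by
        simpa [PySem.Set.contains_iff] using hcv
      rw [if_neg hcvb]
      by_cases hcn : cur ∈ nodes
      · -- A: fresh node, extend the trail; B: color it and step on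
        have hKc : d.contains cur = true := hnodessub cur hcn
        have hccur : colorCur.contains cur = false := by
          rw [hc1 cur, hnodes0 cur hcn]; simp [hcv]
        obtain ⟨nxt, hgetc⟩ : ∃ v, d.get? cur = some v := by
          rw [PySem.Dict.contains_eq_isSome_get?] at hKc
          exact Option.isSome_iff_exists.1 hKc
        have hKc' : d.contains cur = true := hnodessub cur hcn
        obtain ⟨mB, rfl⟩ : ∃ m, nB = m + 1 :=
          ⟨nB - 1, by omega⟩
        rw [if_pos hcn, altWalk, if_pos ⟨hKc', by simp [hccur]⟩]
        simp only [hgetc]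
        have hlen : (PySem.Set.add vis cur).length = vis.length + 1 := by
          rw [PySem.Set.add_of_not_mem hcv, List.length_append]; rfl
        have hBf' : (d.keys.filter (fun k => !(colorCur.insert cur run').contains k)).length
            < mB := by
          have := filter_insert_lt d colorCur cur run' hKc' (by simp [hccur])
          omega
        obtain ⟨i1, i2, i3, i4, i5, i6, i7⟩ :=
          ih mB cur (PySem.Set.add vis cur) color0 (colorCur.insert cur run') run' nxt
            (by omega)
            hBf'
            (PySem.Set.nodup_add vis cur hvnd)
            (fun a ha => by
              rcases (PySem.Set.mem_add vis cur a).1 ha with h | h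
              · exact hvsub h
              · exact h ▸ hcn)
            ((PySem.Set.mem_add vis cur cur).2 (Or.inr rfl))
            (fun k => by
              rw [PySem.Dict.contains_insert, hc1 k]
              by_cases hk : k = cur
              · subst hk; simp [PySem.Set.mem_add]
              · simp [hk, PySem.Set.mem_add])
            (fun k hk => by
              rcases (PySem.Set.mem_add vis cur k).1 hk with h | h
              · rw [PySem.Dict.get?_insert, if_neg (by rintro rfl; exact hcv h)]
                exact hc2 k h
              · rw [h]; exact PySem.Dict.get?_insert_self colorCur cur run')
            (fun k hk => by
              have hk1 : k ∉ vis := fun h => hk ((PySem.Set.mem_add vis cur k).2 (Or.inl h))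
              have hk2 : k ≠ cur := fun h => hk ((PySem.Set.mem_add vis cur k).2 (Or.inr h))
              rw [PySem.Dict.get?_insert, if_neg hk2]
              exact hc3 k hk1)
            h0sub h0fresh hcover hnodes0 hgetc
        exact ⟨i1, i2, i3, i4,
          fun a ha => i5 ((PySem.Set.mem_add vis cur a).2 (Or.inl ha)), i6, i7⟩
      · -- A: node left the remaining nodes; B: the walk hit an old color (or a non-key)
        rw [if_neg hcn]
        by_cases hK : d.contains cur = true
        · have h0c : color0.contains cur = true := hcover cur hK hcn
          have hccur : colorCur.contains cur = true := by rw [hc1 cur, h0c]; rfl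
          rw [altWalk_stop d run' nB colorCur cur (by simp [hccur])]
          refine ⟨hc1, hc2, hc3, hvsub, fun a ha => ha, hvnd, ?_⟩
          obtain ⟨v, hv⟩ : ∃ v, color0.get? cur = some v := by
            rw [PySem.Dict.contains_eq_isSome_get?] at h0c
            exact Option.isSome_iff_exists.1 h0c
          rw [if_neg]
          rintro ⟨-, habs⟩
          rw [PySem.Dict.getD_eq_get?_getD, hc3 cur hcv, hv] at habs
          exact h0fresh cur v hv habs
        · have hccur : colorCur.contains cur = false := by
            rw [hc1 cur]
            have h0c : color0.contains cur = false := by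
              cases h : color0.contains cur
              · rfl
              · exact absurd (h0sub cur h) hK
            rw [h0c]; simp [hcv]
          rw [altWalk_stop d run' nB colorCur cur (by rintro ⟨h1, -⟩; exact hK h1)]
          refine ⟨hc1, hc2, hc3, hvsub, fun a ha => ha, hvnd, ?_⟩
          rw [if_neg]
          rintro ⟨habs, -⟩
          rw [hccur] at habs
          exact Bool.false_ne_true habs

-- lock-step simulation of A's outer loop and B's fold over the keys
theorem outer_sim (d : PySem.Dict Int Int) :
    ∀ (ks : List Int) (nF : Nat) (color : PySem.Dict Int Int) (count run result : Int),
      (ks.filter (fun k => !color.contains k)).length ≤ nF →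
      ks.Nodup → (∀ k ∈ ks, k ∈ d.keys) →
      (∀ k ∈ d.keys, k ∉ ks → color.contains k = true) →
      (∀ k, color.contains k = true → d.contains k = true) →
      (∀ k v, color.get? k = some v → v ≤ run) →
      solLoop d nF (ks.filter (fun k => !color.contains k)) result + count
        = (ks.foldl (altStep d) (color, count, run)).2.1 + result := by
  intro ks
  induction ks with
  | nil =>
    intro nF color count run result _ _ _ _ _ _
    rw [List.filter_nil, List.foldl_nil]
    cases nF with
    | zero => show result + count = count + result; omega
    | succ m => show result + count = count + result; omega
  | cons start tl ihk =>
    intro nF color count run result hF hksnd hkssub hproc hcsub hfresh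
    have hstnotl : start ∉ tl := (List.nodup_cons.1 hksnd).1
    have htlnd : tl.Nodup := (List.nodup_cons.1 hksnd).2
    have htlsub : ∀ k ∈ tl, k ∈ d.keys := fun k hk => hkssub k (List.mem_cons_of_mem _ hk)
    rw [List.foldl_cons]
    by_cases hcs : color.contains start = true
    · -- start already colored: A's filter and B's fold both skip it
      have hfe : (start :: tl).filter (fun k => !color.contains k)
          = tl.filter (fun k => !color.contains k) := List.filter_cons_of_neg (by simp [hcs])
      rw [hfe]
      rw [hfe] at hF
      have hstep : altStep d (color, count, run) start = (color, count, run) := by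
        simp [altStep, hcs]
      rw [hstep]
      refine ihk nF color count run result hF htlnd htlsub ?_ hcsub hfresh
      intro k hk hkt
      by_cases hks : k = start
      · exact hks ▸ hcs
      · exact hproc k hk (by simp [hks, hkt])
    · -- start begins a fresh walk
      have hfilter : (start :: tl).filter (fun k => !color.contains k)
          = start :: tl.filter (fun k => !color.contains k) := by
        rw [List.filter_cons_of_pos (by simp [hcs])]
      set L := tl.filter (fun k => !color.contains k) with hL
      rw [hfilter]
      rw [hfilter] at hF
      obtain ⟨mF, rfl⟩ : ∃ m, nF = m + 1 := ⟨nF - 1, by simp at hF; omega⟩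
      have hLsub : ∀ x ∈ L, x ∈ tl := fun x hx => (List.mem_filter.1 hx).1
      have hnodesnd : (start :: L).Nodup :=
        List.nodup_cons.2 ⟨fun h => hstnotl (hLsub _ h), htlnd.filter _⟩
      have hKst : d.contains start = true :=
        (PySem.Dict.contains_iff_mem_keys d start).2 (hkssub start List.mem_cons_self)
      have hnodessub : ∀ x ∈ start :: L, d.contains x = true := by
        intro x hx
        rcases List.mem_cons.1 hx with rfl | hx
        · exact hKst
        · exact (PySem.Dict.contains_iff_mem_keys d x).2 (htlsub x (hLsub _ hx))
      have hnodes0 : ∀ k ∈ start :: L, color.contains k = false := by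
        intro k hk
        rcases List.mem_cons.1 hk with h | hk
        · rw [h]
          cases h2 : color.contains start with
          | false => rfl
          | true => exact absurd h2 hcs
        · have h3 := (List.mem_filter.1 hk).2
          cases h : color.contains k with
          | false => rfl
          | true => rw [h] at h3; exact absurd h3 (by simp)
      obtain ⟨c0, hget0⟩ : ∃ v, d.get? start = some v := by
        have h := hKst
        rw [PySem.Dict.contains_eq_isSome_get?] at h
        exact Option.isSome_iff_exists.1 h
      have hvis0 : (PySem.Set.ofList [start] : PySem.Set Int) = [start] := rfl
      have hsize : d.keys.length = d.size := by
        simp [PySem.Dict.keys, PySem.Dict.size]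
      have hBf : (d.keys.filter (fun k => !(color.insert start (run + 1)).contains k)).length
          < d.size := by
        have h1 := filter_insert_lt d color start (run + 1) hKst hcs
        have h2 := List.length_filter_le (fun k => !color.contains k) d.keys
        omega
      have hwalk1 : altWalk d (run + 1) (d.size + 1) color start
          = altWalk d (run + 1) d.size (color.insert start (run + 1)) c0 := by
        rw [altWalk, if_pos ⟨hKst, hcs⟩]
        simp only [hget0]
      obtain ⟨i1, i2, i3, i4, i5, i6, i7⟩ :=
        inner_sim d (start :: L) hnodessub ((start :: L).length + 1) d.size start
          (PySem.Set.ofList [start]) color (color.insert start (run + 1)) (run + 1) c0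
          (by rw [hvis0]; simp)
          hBf
          (by rw [hvis0]; simp)
          (by rw [hvis0]; intro a ha; simp at ha; subst ha; exact List.mem_cons_self)
          (by rw [hvis0]; exact List.mem_cons_self)
          (fun k => by
            rw [hvis0, PySem.Dict.contains_insert]
            by_cases hk : k = start
            · subst hk; simp
            · simp [hk])
          (fun k hk => by
            rw [hvis0] at hk
            simp at hk
            rw [hk]
            exact PySem.Dict.get?_insert_self color start (run + 1))
          (fun k hk => by
            rw [hvis0] at hk
            simp at hk
            rw [PySem.Dict.get?_insert, if_neg hk])
          hcsub
          (fun k v hv habs => by have := hfresh k v hv; omega)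
          (fun k hk hkn => by
            by_cases hck : color.contains k = true
            · exact hck
            · exfalso
              by_cases hks : k = start
              · exact hkn (hks ▸ List.mem_cons_self)
              · by_cases hkt : k ∈ tl
                · exact hkn (List.mem_cons_of_mem _
                    (List.mem_filter.2 ⟨hkt, by simp [hck]⟩))
                · exact hck (hproc k ((PySem.Dict.contains_iff_mem_keys d k).1 hk)
                    (by simp [hks, hkt])))
          hnodes0 hget0
      set A2 := (solInner d (start :: L) ((start :: L).length + 1) start
        (PySem.Set.ofList [start])).2 with hA2
      set inc := (solInner d (start :: L) ((start :: L).length + 1) start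
        (PySem.Set.ofList [start])).1 with hinc
      set BF := altWalk d (run + 1) d.size (color.insert start (run + 1)) c0 with hBF
      have hstA2 : start ∈ A2 := i5 (by rw [hvis0]; exact List.mem_cons_self)
      -- A's rebuilt `nodes` is exactly the keys B has not colored
      have hdiff0 : PySem.Set.diff (PySem.Set.ofList (start :: L)) A2
          = L.filter (fun x => !PySem.Set.contains A2 x) := by
        rw [PySem.Set.ofList_eq_self_of_nodup _ hnodesnd]
        show (start :: L).filter (fun x => !PySem.Set.contains A2 x) = _
        rw [List.filter_cons_of_neg
          (by simp [hstA2])]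
      have hdiff : PySem.Set.diff (PySem.Set.ofList (start :: L)) A2
          = tl.filter (fun k => !BF.1.contains k) := by
        rw [hdiff0, hL, List.filter_filter]
        apply List.filter_congr
        intro k hk
        rw [i1 k]
        simp [Bool.not_or, Bool.and_comm]
      -- A's one outer iteration
      have hAstep : solLoop d (mF + 1) (start :: L) result
          = solLoop d mF (PySem.Set.diff (PySem.Set.ofList (start :: L)) A2) (result + inc) := by
        rw [solLoop]
      -- B's one fold step
      have hBstep : altStep d (color, count, run) start
          = (if BF.1.contains BF.2 ∧ BF.1.getD BF.2 0 = run + 1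
             then (BF.1, count + 1, run + 1) else (BF.1, count, run + 1)) := by
        rw [altStep, if_neg hcs, ← hwalk1]
      have hF' : (tl.filter (fun k => !BF.1.contains k)).length ≤ mF := by
        rw [← hdiff, hdiff0]
        have h1 := List.length_filter_le (fun x => !PySem.Set.contains A2 x) L
        simp at hF
        omega
      have hproc' : ∀ k ∈ d.keys, k ∉ tl → BF.1.contains k = true := by
        intro k hk hkt
        rw [i1 k]
        by_cases hks : k = start
        · subst hks; simp [hstA2]
        · rw [hproc k hk (by simp [hks, hkt])]; rfl
      have hcsub' : ∀ k, BF.1.contains k = true → d.contains k = true := by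
        intro k hk
        rw [i1 k] at hk
        rcases Bool.or_eq_true_iff.1 hk with h | h
        · exact hcsub k h
        · exact hnodessub k (i4 (of_decide_eq_true h))
      have hfresh' : ∀ k v, BF.1.get? k = some v → v ≤ run + 1 := by
        intro k v hv
        by_cases hk : k ∈ A2
        · rw [i2 k hk] at hv
          injection hv with h
          omega
        · rw [i3 k hk] at hv
          have := hfresh k v hv; omega
      by_cases hP : BF.1.contains BF.2 ∧ BF.1.getD BF.2 0 = run + 1
      · have hinc1 : inc = 1 := by rw [i7, if_pos hP]
        have hih := ihk mF BF.1 (count + 1) (run + 1) (result + inc) hF' htlnd htlsub hproc'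
          hcsub' hfresh'
        rw [hAstep, hdiff, hBstep, if_pos hP]
        omega
      · have hinc0 : inc = 0 := by rw [i7, if_neg hP]
        have hih := ihk mF BF.1 count (run + 1) (result + inc) hF' htlnd htlsub hproc'
          hcsub' hfresh'
        rw [hAstep, hdiff, hBstep, if_neg hP]
        omega

-- ===== VERDICT (by name: the statement is the Claim_ definition above) =====
theorem solution_spec : Claim_equal_solution := by
  intro links _
  unfold Spec_solution solution solution_alt
  have h := outer_sim (PySem.Dict.ofList links)
    (PySem.Dict.ofList links).keys (PySem.Dict.ofList links).keys.length PySem.Dict.empty 0 0 0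
    (by simp [PySem.Dict.contains_empty])
    (PySem.Dict.nodup_keys_ofList links) (fun k hk => hk)
    (fun k hk hk2 => absurd hk hk2)
    (by simp [PySem.Dict.contains_empty]) (by simp [PySem.Dict.get?_empty])
  simpa using h
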